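-- pv_equiv track=rewrite | github.com/Sawanoza/COMP472 | MiniChess.py | heuristic_e0
-- ===== SOURCE A (Python) =====
-- def heuristic_e0(game_state):
--     """
--     Basic material-based heuristic e0:
--       Pawn=1, Bishop=3, Knight=3, Queen=9, King=999
--       e0 = (WhiteTotal) - (BlackTotal)
--       positive score favors White, negative score favors Black
--     """
--     #Initialize scores for White and Black
--     white_score = 0
--     black_score = 0
--
--     #Loop through every row of the board
--     for row in game_state["board"]:
--         for cell in row: #Iterate through each cell in the row
--             #Evaluate White pieces
--             if cell == 'wp': #White Pawn
--                 white_score += 1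
--             elif cell == 'wB': #White Bishop
--                 white_score += 3
--             elif cell == 'wN': #White Knight
--                 white_score += 3
--             elif cell == 'wQ': #White Queen
--                 white_score += 9
--             elif cell == 'wK': #White King
--                 white_score += 999
--
--             #Evaluate Black pieces
--             elif cell == 'bp': #Black Pawn
--                 black_score += 1
--             elif cell == 'bB': #Black Bishop
--                 black_score += 3
--             elif cell == 'bN': #Black Knight
--                 black_score += 3
--             elif cell == 'bQ': #Black Queen
--                 black_score += 9
--             elif cell == 'bK': #Black King
--                 black_score += 999
--
--     #Compute heuristic value
--     return white_score - black_score
-- ===== SOURCE B (Python) =====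
-- def heuristic_e0(game_state):
--     # Tally all cells once, then take a weighted sum over piece types
--     # using a signed value table (white positive, black negative).
--     counts = {}
--     for row in game_state["board"]:
--         for cell in row:
--             counts[cell] = counts.get(cell, 0) + 1
--     value = {'wp': 1, 'wB': 3, 'wN': 3, 'wQ': 9, 'wK': 999,
--              'bp': -1, 'bB': -3, 'bN': -3, 'bQ': -9, 'bK': -999}
--     return sum(value.get(piece, 0) * count for piece, count in counts.items())
-- ===== Notes on version B (the rewrite author's own statement) =====
-- stated objective: alternative
-- what changed: Replaces the per-cell 10-way if/elif branching accumulating separate white and black scores by a one-pass tally of cell strings into a dict followed by a weighted sum over the distinct piece types with a signed value table.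
import Mathlib
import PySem

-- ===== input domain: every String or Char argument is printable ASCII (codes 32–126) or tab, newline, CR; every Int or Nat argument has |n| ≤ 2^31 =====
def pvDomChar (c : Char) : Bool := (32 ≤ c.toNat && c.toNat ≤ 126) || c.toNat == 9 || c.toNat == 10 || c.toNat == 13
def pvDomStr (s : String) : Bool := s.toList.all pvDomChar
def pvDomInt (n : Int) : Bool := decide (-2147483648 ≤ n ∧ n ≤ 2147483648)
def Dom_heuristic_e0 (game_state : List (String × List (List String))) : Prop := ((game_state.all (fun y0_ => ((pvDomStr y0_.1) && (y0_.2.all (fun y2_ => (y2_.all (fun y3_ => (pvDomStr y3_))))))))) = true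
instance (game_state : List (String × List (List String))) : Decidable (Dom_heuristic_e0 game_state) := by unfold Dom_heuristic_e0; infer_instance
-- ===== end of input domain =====

-- B replaces A's per-cell if/elif scoring by a tally of cells plus a weighted sum over
-- piece types with a signed value table (objective: alternative decomposition, same cost).

-- ===== PORT A =====
-- the body of A's inner loop (the 10-way branch chain), verbatim
def stepA (st : Int × Int) (cell : String) : Int × Int :=
  if cell = "wp" then (st.1 + 1, st.2)
  else if cell = "wB" then (st.1 + 3, st.2)
  else if cell = "wN" then (st.1 + 3, st.2)
  else if cell = "wQ" then (st.1 + 9, st.2)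
  else if cell = "wK" then (st.1 + 999, st.2)
  else if cell = "bp" then (st.1, st.2 + 1)
  else if cell = "bB" then (st.1, st.2 + 3)
  else if cell = "bN" then (st.1, st.2 + 3)
  else if cell = "bQ" then (st.1, st.2 + 9)
  else if cell = "bK" then (st.1, st.2 + 999)
  else st

def heuristic_e0 (game_state : List (String × List (List String))) : Int :=
  match (PySem.Dict.ofList game_state).get? "board" with
  | none => 0  -- Python raises KeyError here; excluded by Pre_
  | some board =>
    let st := board.foldl (fun st row => row.foldl stepA st) ((0 : Int), (0 : Int))
    st.1 - st.2

-- ===== PORT B =====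
def pieceValue : PySem.Dict String Int :=
  PySem.Dict.ofList [("wp", 1), ("wB", 3), ("wN", 3), ("wQ", 9), ("wK", 999),
                     ("bp", -1), ("bB", -3), ("bN", -3), ("bQ", -9), ("bK", -999)]

def heuristic_e0_alt (game_state : List (String × List (List String))) : Int :=
  match (PySem.Dict.ofList game_state).get? "board" with
  | none => 0  -- Python raises KeyError here; excluded by Pre_
  | some board =>
    let counts := board.foldl (fun counts row =>
      row.foldl (fun (counts : PySem.Dict String Int) cell =>
        counts.insert cell (counts.getD cell 0 + 1)) counts) PySem.Dict.empty
    (counts.items.map (fun p => pieceValue.getD p.1 0 * p.2)).sum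

-- ===== PRECONDITION & SPEC =====
-- Pre_ excludes exactly the inputs without a "board" key, on which A raises KeyError.
def Pre_heuristic_e0 (game_state : List (String × List (List String))) : Prop :=
  "board" ∈ game_state.map Prod.fst
instance (game_state : List (String × List (List String))) : Decidable (Pre_heuristic_e0 game_state) := by
  unfold Pre_heuristic_e0; infer_instance
def pvWitness_heuristic_e0 : (List (String × List (List String))) :=
  [("board", [["wp", ""], ["bK", "wQ"]])]
def Spec_heuristic_e0 (game_state : List (String × List (List String))) (out : Int) : Prop := out = heuristic_e0_alt game_state
instance (game_state : List (String × List (List String))) (out : Int) : Decidable (Spec_heuristic_e0 game_state out) := by unfold Spec_heuristic_e0; infer_instance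

-- ===== CLAIM (what is proved, stated in full; the proofs are below) =====
def Claim_equal_heuristic_e0 : Prop := ∀ (game_state : List (String × List (List String))), Dom_heuristic_e0 game_state → Pre_heuristic_e0 game_state → Spec_heuristic_e0 game_state (heuristic_e0 game_state)

-- ===== LEMMAS AND PROOFS =====

-- the signed per-cell value that A's branch chain realises
def cellVal (cell : String) : Int :=
  if cell = "wp" then 1
  else if cell = "wB" then 3
  else if cell = "wN" then 3
  else if cell = "wQ" then 9
  else if cell = "wK" then 999
  else if cell = "bp" then -1
  else if cell = "bB" then -3
  else if cell = "bN" then -3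
  else if cell = "bQ" then -9
  else if cell = "bK" then -999
  else 0

set_option maxHeartbeats 1000000 in
lemma cellVal_eq_getD (cell : String) : cellVal cell = pieceValue.getD cell 0 := by
  unfold cellVal
  split_ifs with h1 h2 h3 h4 h5 h6 h7 h8 h9 h10
  · subst h1; decide
  · subst h2; decide
  · subst h3; decide
  · subst h4; decide
  · subst h5; decide
  · subst h6; decide
  · subst h7; decide
  · subst h8; decide
  · subst h9; decide
  · subst h10; decide
  · simp [pieceValue, PySem.Dict.ofList, PySem.Dict.getD_eq_get?_getD, PySem.Dict.update,
      PySem.Dict.get?_insert, h1, h2, h3, h4, h5, h6, h7, h8, h9, h10]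

set_option maxHeartbeats 2000000 in
lemma foldlA_sub (l : List String) : ∀ (w b : Int),
    (l.foldl stepA (w, b)).1 - (l.foldl stepA (w, b)).2 = w - b + (l.map cellVal).sum := by
  induction l with
  | nil => intro w b; simp
  | cons x xs ih =>
    intro w b
    simp only [List.foldl_cons, List.map_cons, List.sum_cons, stepA, cellVal]
    split_ifs <;> rw [ih] <;> ring

lemma countsB_eq_counter (board : List (List String)) :
    board.foldl (fun counts row =>
      row.foldl (fun (counts : PySem.Dict String Int) cell =>
        counts.insert cell (counts.getD cell 0 + 1)) counts) PySem.Dict.empty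
      = PySem.Dict.counter board.flatten := by
  rw [← PySem.Dict.foldl_insert_getD_add_one_eq_counter, ← List.foldl_flatten]

lemma sum_items_counter (l : List String) (f : String → Int) :
    (((PySem.Dict.counter l).items).map (fun p => f p.1 * p.2)).sum = (l.map f).sum := by
  rw [PySem.Dict.items_counter, List.map_map]
  have hfin : (PySem.Set.ofList l).toFinset = l.toFinset := by
    apply Finset.ext; intro a; simp [PySem.Set.mem_ofList]
  rw [show ((fun p : String × Int => f p.1 * p.2) ∘ fun k => (k, (l.count k : Int)))
        = fun k => f k * (l.count k : Int) from rfl]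
  rw [← List.sum_toFinset _ (PySem.Set.nodup_ofList (xs := l)), hfin, Finset.sum_list_map_count]
  exact Finset.sum_congr rfl (fun m _ => by simp; ring)

-- ===== VERDICT (by name: the statement is the Claim_ definition above) =====
theorem heuristic_e0_spec : Claim_equal_heuristic_e0 := by
  intro gs _ _
  unfold Spec_heuristic_e0 heuristic_e0 heuristic_e0_alt
  cases h : (PySem.Dict.ofList gs).get? "board" with
  | none => rfl
  | some board =>
    simp only [countsB_eq_counter]
    rw [← List.foldl_flatten, foldlA_sub]
    have : cellVal = fun c => pieceValue.getD c 0 := funext cellVal_eq_getD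
    rw [this, sum_items_counter board.flatten (fun c => pieceValue.getD c 0)]
    ring
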